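-- pv_equiv track=rewrite | github.com/mals14/adventcode2018 | day2_1.py | is_char_repeat
-- ===== SOURCE A (Python) =====
-- def is_char_repeat(label, count):
--     char_tested = []
--     unique_char_list = list(set(label)) # created list of unique characters using list and set
--     for unique_char in unique_char_list:
--         unique_char_count = 0
--         for char in label:
--             if unique_char == char:
--                 unique_char_count += 1
--         # now counted how many times unique_char repeats in label
--         if unique_char_count == count:
--             return 1
--     return 0
-- ===== SOURCE B (Python) =====
-- def is_char_repeat(label, count):
--     counts = {}
--     for ch in label:
--         counts[ch] = counts.get(ch, 0) + 1
--     return 1 if count in counts.values() else 0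
-- ===== Notes on version B (the rewrite author's own statement) =====
-- stated objective: alternative
-- what changed: B builds a character-count dictionary in one pass over the label and checks its values, instead of A's rescanning the whole label once per unique character.
import Mathlib
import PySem

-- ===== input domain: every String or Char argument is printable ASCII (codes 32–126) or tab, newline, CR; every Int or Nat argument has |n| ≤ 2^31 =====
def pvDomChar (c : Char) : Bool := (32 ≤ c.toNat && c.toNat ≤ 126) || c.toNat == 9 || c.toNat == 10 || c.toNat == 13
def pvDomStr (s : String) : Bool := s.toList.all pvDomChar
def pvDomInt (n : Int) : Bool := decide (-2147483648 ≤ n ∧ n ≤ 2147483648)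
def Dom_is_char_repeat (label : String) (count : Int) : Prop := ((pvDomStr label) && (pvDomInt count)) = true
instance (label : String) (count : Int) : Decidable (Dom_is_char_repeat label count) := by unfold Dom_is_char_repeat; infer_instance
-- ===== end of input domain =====

-- B replaces A's rescan of the label for every unique character by one counting pass building a dict.

-- ===== PORT A =====
-- inner loop: unique_char_count accumulated over label
def icrCountLoop (label : List Char) (u : Char) : Int :=
  label.foldl (fun acc ch => if u == ch then acc + 1 else acc) 0

-- outer loop over unique_char_list, with the early 'return 1'
def icrOuter (label : List Char) (count : Int) : List Char → Int
  | [] => 0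
  | u :: rest => if icrCountLoop label u = count then 1 else icrOuter label count rest

def is_char_repeat (label : String) (count : Int) : Int :=
  icrOuter label.toList count (PySem.Set.ofList label.toList)

-- ===== PORT B =====
def is_char_repeat_alt (label : String) (count : Int) : Int :=
  if count ∈ (label.toList.foldl (fun d ch => d.modify ch 0 (· + 1)) (PySem.Dict.empty : PySem.Dict Char Int)).values
  then 1 else 0

-- ===== PRECONDITION & SPEC =====
def Spec_is_char_repeat (label : String) (count : Int) (out : Int) : Prop := out = is_char_repeat_alt label count
instance (label : String) (count : Int) (out : Int) : Decidable (Spec_is_char_repeat label count out) := by unfold Spec_is_char_repeat; infer_instance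

-- ===== CLAIM (what is proved, stated in full; the proofs are below) =====
def Claim_equal_is_char_repeat : Prop := ∀ (label : String) (count : Int), Dom_is_char_repeat label count → Spec_is_char_repeat label count (is_char_repeat label count)

-- ===== LEMMAS AND PROOFS =====

-- the inner loop is the count of u in label
theorem icrCountLoop_eq (label : List Char) (u : Char) :
    icrCountLoop label u = (label.count u : Int) := by
  rw [icrCountLoop, PySem.List.foldl_if_add_one (fun ch => u == ch), zero_add, List.count]
  norm_cast
  exact List.countP_congr (fun x _ => by rw [BEq.comm])

-- A's outer loop returns 1 iff some scanned character's count in label equals `count`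
theorem icrOuter_eq (label : List Char) (count : Int) (us : List Char) :
    icrOuter label count us = if count ∈ us.map (fun u => (label.count u : Int)) then 1 else 0 := by
  induction us with
  | nil => simp [icrOuter]
  | cons u rest ih =>
    simp only [icrOuter, icrCountLoop_eq, ih, List.map_cons, List.mem_cons]
    by_cases h : ((label.count u : Int)) = count
    · simp [h]
    · simp [Ne.symm h]
      exact fun hc => absurd hc h

theorem is_char_repeat_spec : Claim_equal_is_char_repeat := by
  intro label count _
  unfold Spec_is_char_repeat is_char_repeat is_char_repeat_alt
  rw [icrOuter_eq, ← PySem.Dict.counter_eq_foldl,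
    PySem.Dict.values_eq_map_keys _ (by rw [PySem.Dict.keys_counter]; exact PySem.Set.nodup_ofList _) 0,
    PySem.Dict.keys_counter,
    List.map_congr_left (fun k _ => PySem.Dict.getD_counter label.toList k)]
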